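-- pv_equiv track=rewrite | github.com/mavdian14/Portfolio | Dynamic Programming/Equal.py | equal
-- ===== SOURCE A (Python) =====
-- def equal(arr):
--     arr.sort()
--     #arr if we give everyone 1 piece
--     arr2 = [x+1 for x in arr]
--     arr2[0] = arr[0]
--     arr3 = [x+2 for x in arr]
--     arr3[0] = arr[0]
--
--     def test(arr):
--         cost = 0
--         steps = 0
--         cur = arr[0]
--         for i in range(1,len(arr)):
--             diff = abs(arr[i]+cost-cur)
--             cur = max(cur,arr[i]+cost)
--             cost+=diff
--             steps+=diff//5+(diff%5)//2+(diff%5)%2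
--         return steps
--     return min(test(arr),test(arr2)+1,test(arr3)+1)
-- ===== SOURCE B (Python) =====
-- def equal(arr):
--     m = min(arr)
--     t0 = t1 = t2 = 0
--     for x in arr:
--         d = x - m
--         t0 += d // 5 + d % 5 // 2 + d % 5 % 2
--         d1 = d + 1
--         t1 += d1 // 5 + d1 % 5 // 2 + d1 % 5 % 2
--         d2 = d1 + 1
--         t2 += d2 // 5 + d2 % 5 // 2 + d2 % 5 % 2
--     return min(t0, t1, t2)
-- ===== Notes on version B (the rewrite author's own statement) =====
-- stated objective: faster
-- what changed: B drops the sort and the simulated giving loop entirely: it finds the minimum in one pass and sums per-element coin counts (d//5 + d%5//2 + d%5%2) for the three candidate bases min, min+1, min+2 in a single pass, using the fact that A's loop telescopes to exactly those sums.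
-- outside the precondition, e.g. on equal([]): A raises IndexError, B raises ValueError
import Mathlib
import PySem

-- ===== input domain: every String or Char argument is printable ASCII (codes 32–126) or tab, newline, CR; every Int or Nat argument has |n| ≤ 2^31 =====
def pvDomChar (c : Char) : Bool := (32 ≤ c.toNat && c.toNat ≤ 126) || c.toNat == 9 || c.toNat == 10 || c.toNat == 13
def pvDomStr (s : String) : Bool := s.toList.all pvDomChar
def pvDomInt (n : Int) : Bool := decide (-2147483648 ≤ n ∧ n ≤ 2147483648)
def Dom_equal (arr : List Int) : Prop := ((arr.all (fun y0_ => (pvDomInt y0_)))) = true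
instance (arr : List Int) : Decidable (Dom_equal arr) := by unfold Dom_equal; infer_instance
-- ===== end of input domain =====

-- B replaces A's sort + three simulated giving loops by a single O(n) pass summing coin counts
-- for the three candidate bases min, min+1, min+2 (measured asymptotically faster).
-- Note: A sorts its argument in place; B does not mutate it — the claim is about return values only.

-- coin count for a nonnegative distance d: d//5 + d%5//2 + d%5%2 (shared by both ports)
def pvCoins (d : Int) : Int :=
  PySem.Int.floordiv d 5 + PySem.Int.floordiv (PySem.Int.mod d 5) 2
    + PySem.Int.mod (PySem.Int.mod d 5) 2

-- ===== PORT A =====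
-- one iteration of A's inner loop on state (cost, steps, cur) and element x = arr[i]
def pvStepA (st : Int × Int × Int) (x : Int) : Int × Int × Int :=
  let diff := |x + st.1 - st.2.2|
  (st.1 + diff, st.2.1 + pvCoins diff, max st.2.2 (x + st.1))

-- A's inner 'def test(arr)': loop over range(1, len(arr)) with state (cost, steps, cur)
def pvTestA (a : List Int) : Int :=
  (((PySem.List.pyRange 1 (a.length : Int) 1).foldl
    (fun st i => pvStepA st (PySem.List.pyGetD a i 0))
    (0, 0, PySem.List.pyGetD a 0 0))).2.1

def equal (arr : List Int) : Int :=
  let s := PySem.List.sorted arr (fun x => x) false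
  match PySem.List.pyGet? s 0 with
  | none => 0   -- Python raises IndexError here (arr2[0] = arr[0] on the empty list); excluded by Pre_equal
  | some h =>
    let arr2 := PySem.List.pySetD (s.map (fun x => x + 1)) 0 h
    let arr3 := PySem.List.pySetD (s.map (fun x => x + 2)) 0 h
    min (pvTestA s) (min (pvTestA arr2 + 1) (pvTestA arr3 + 1))

-- ===== PORT B =====
-- one iteration of B's pass: add the coin counts for distances d, d+1, d+2
def pvStepB (m : Int) (t : Int × Int × Int) (x : Int) : Int × Int × Int :=
  let d := x - m
  let d1 := d + 1
  let d2 := d1 + 1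
  (t.1 + pvCoins d, t.2.1 + pvCoins d1, t.2.2 + pvCoins d2)

def equal_alt (arr : List Int) : Int :=
  match PySem.List.min? arr (fun x => x) with
  | none => 0   -- Python raises ValueError here (min of empty list); excluded by Pre_equal
  | some m =>
    let t := arr.foldl (fun t x => pvStepB m t x) (0, 0, 0)
    min t.1 (min t.2.1 t.2.2)

-- ===== PRECONDITION & SPEC =====
-- A raises IndexError on the empty list (and B's min raises ValueError); excluded.
def Pre_equal (arr : List Int) : Prop := arr ≠ []
instance (arr : List Int) : Decidable (Pre_equal arr) := by unfold Pre_equal; infer_instance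
def pvWitness_equal : List Int := ([2, 2, 3, 7])

def Spec_equal (arr : List Int) (out : Int) : Prop := out = equal_alt arr
instance (arr : List Int) (out : Int) : Decidable (Spec_equal arr out) := by unfold Spec_equal; infer_instance

-- ===== CLAIM (what is proved, stated in full; the proofs are below) =====
def Claim_equal_equal : Prop := ∀ (arr : List Int), Dom_equal arr → Pre_equal arr → Spec_equal arr (equal arr)

-- ===== LEMMAS AND PROOFS =====

theorem pvCoins_zero : pvCoins 0 = 0 := by decide
theorem pvCoins_one : pvCoins 1 = 1 := by decide
theorem pvCoins_two : pvCoins 2 = 1 := by decide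

-- A's loop telescopes: with invariant cur = cost + h and every element ≥ h,
-- the final step counter is the sum of pvCoins (x - h).
theorem pvTestA_loop (l : List Int) (h : Int) (hle : ∀ x ∈ l, h ≤ x) :
    ∀ (cost steps : Int),
      ((l.foldl pvStepA (cost, steps, cost + h))).2.1
      = steps + (l.map (fun x => pvCoins (x - h))).sum := by
  induction l with
  | nil => intro cost steps; simp
  | cons x t ih =>
    intro cost steps
    have hx : h ≤ x := hle x (by simp)
    have hstep : pvStepA (cost, steps, cost + h) x
        = (cost + (x - h), steps + pvCoins (x - h), (cost + (x - h)) + h) := by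
      have habs : |x + cost - (cost + h)| = x - h := by rw [abs_of_nonneg (by omega)]; ring
      have hmax : max (cost + h) (x + cost) = (cost + (x - h)) + h := by
        rw [max_eq_right (by omega)]; ring
      simp [pvStepA, habs, hmax]
    simp only [List.foldl_cons, hstep]
    rw [ih (fun y hy => hle y (by simp [hy]))]
    simp [List.map_cons]; ring

theorem pvTestA_cons (h : Int) (t : List Int) (hle : ∀ x ∈ t, h ≤ x) :
    pvTestA (h :: t) = (t.map (fun x => pvCoins (x - h))).sum := by
  unfold pvTestA
  rw [PySem.List.foldl_pyRange_pyGetD' (h :: t) 0 pvStepA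
        (0, 0, PySem.List.pyGetD (h :: t) 0 0) (by omega : (0:Int) ≤ 1)]
  simp only [Int.toNat_one, List.drop_succ_cons, List.drop_zero, PySem.List.pyGetD_zero_cons]
  have := pvTestA_loop t h hle 0 0
  simpa using this

-- B's single pass computes the three sums
theorem equal_alt_loop (m : Int) (l : List Int) :
    ∀ (a b c : Int),
      l.foldl (fun t x => pvStepB m t x) (a, b, c)
      = (a + (l.map (fun x => pvCoins (x - m))).sum,
         b + (l.map (fun x => pvCoins (x - m + 1))).sum,
         c + (l.map (fun x => pvCoins (x - m + 1 + 1))).sum) := by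
  induction l with
  | nil => intro a b c; simp
  | cons x t ih =>
    intro a b c
    rw [List.foldl_cons,
      show pvStepB m (a, b, c) x
        = (a + pvCoins (x - m), b + pvCoins (x - m + 1), c + pvCoins (x - m + 1 + 1)) from rfl,
      ih]
    simp only [List.map_cons, List.sum_cons]
    refine Prod.ext (by ring) (Prod.ext (by ring) (by ring))

-- ===== VERDICT (by name: the statement is the Claim_ definition above) =====
theorem equal_spec : Claim_equal_equal := by
  intro arr _ hpre
  unfold Spec_equal equal equal_alt
  have hsne : PySem.List.sorted arr (fun x => x) false ≠ [] := by
    simpa [PySem.List.sorted_eq_nil_iff] using hpre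
  obtain ⟨h, t, hst⟩ := List.exists_cons_of_ne_nil hsne
  have hperm : (PySem.List.sorted arr (fun x => x) false).Perm arr :=
    PySem.List.sorted_perm arr _ _
  have hmem : h ∈ arr := hperm.mem_iff.mp (by simp [hst])
  have hne : arr ≠ [] := hpre
  -- min? returns some m with m = h
  obtain ⟨m, hm⟩ : ∃ m, PySem.List.min? arr (fun x => x) = some m := by
    cases hmin : PySem.List.min? arr (fun x => x) with
    | none => exact absurd ((PySem.List.min?_eq_none_iff arr (fun x => x)).mp hmin) hne
    | some m => exact ⟨m, rfl⟩
  have hhle : ∀ y ∈ arr, h ≤ y := PySem.List.key_head_sorted_le arr (fun x => x) hst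
  have hmmem : m ∈ arr := PySem.List.min?_mem hm
  have hmle : ∀ y ∈ arr, m ≤ y := PySem.List.min?_isMin hm
  have hmh : m = h := le_antisymm (hmle h hmem) (hhle m hmmem)
  have htle : ∀ x ∈ t, h ≤ x := fun x hx => hhle x (hperm.mem_iff.mp (by simp [hst, hx]))
  rw [hst, hm, hmh]
  simp only [PySem.List.pyGet?_zero_cons]
  -- reduce A's three tests
  have hA1 : pvTestA (h :: t) = (t.map (fun x => pvCoins (x - h))).sum := pvTestA_cons h t htle
  have hset1 : PySem.List.pySetD ((h :: t).map (fun x => x + 1)) 0 h = h :: t.map (fun x => x + 1) := by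
    rw [List.map_cons, show (0 : Int) = ((0 : Nat) : Int) from rfl, PySem.List.pySetD_natCast]
    rfl
  have hset2 : PySem.List.pySetD ((h :: t).map (fun x => x + 2)) 0 h = h :: t.map (fun x => x + 2) := by
    rw [List.map_cons, show (0 : Int) = ((0 : Nat) : Int) from rfl, PySem.List.pySetD_natCast]
    rfl
  have hle1 : ∀ x ∈ t.map (fun x => x + 1), h ≤ x := by
    intro x hx
    obtain ⟨y, hy, rfl⟩ := List.mem_map.mp hx
    have := htle y hy; omega
  have hle2 : ∀ x ∈ t.map (fun x => x + 2), h ≤ x := by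
    intro x hx
    obtain ⟨y, hy, rfl⟩ := List.mem_map.mp hx
    have := htle y hy; omega
  have hA2 : pvTestA (h :: t.map (fun x => x + 1))
      = (t.map (fun x => pvCoins (x - h + 1))).sum := by
    rw [pvTestA_cons h _ hle1, List.map_map]
    congr 1
    apply List.map_congr_left
    intro x _
    simp only [Function.comp_apply]
    congr 1
    omega
  have hA3 : pvTestA (h :: t.map (fun x => x + 2))
      = (t.map (fun x => pvCoins (x - h + 1 + 1))).sum := by
    rw [pvTestA_cons h _ hle2, List.map_map]
    congr 1
    apply List.map_congr_left
    intro x _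
    simp only [Function.comp_apply]
    congr 1
    omega
  -- reduce B's pass; its sums over arr equal sums over h :: t by the permutation
  have hBsum : ∀ f : Int → Int, (arr.map f).sum = ((h :: t).map f).sum := by
    intro f
    have hs := (List.Perm.sum_eq (hperm.map f)).symm
    rwa [hst] at hs
  rw [hset1, hset2, hA1, hA2, hA3, equal_alt_loop]
  simp only [hBsum, List.map_cons, List.sum_cons, sub_self, pvCoins_zero,
    show (0 : Int) + 1 = 1 from by ring, pvCoins_one,
    show (1 : Int) + 1 = 2 from by ring, pvCoins_two, min_def]
  split_ifs <;> omega
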